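-- pv_equiv track=rewrite | github.com/niallmcc/som | test/test_patterns.py | __summarise_class_assignments
-- ===== SOURCE A (Python) =====
-- def __summarise_class_assignments(assignments, grid_width, grid_height):
--     """Analyse a dictionary returned by __get_class_assignments, return the number of
--     grid cells where multiple input classes were matched (non-separations) and a text
--     summary of the grid showing which (if any) class was matched to each grid cell"""
--     summary_text = ""
--     non_separations = 0
--     for x in range(grid_width):
--         row = ""
--         for y in range(grid_height):
--             if (x, y) not in assignments:
--                 row += "."
--             else:
--                 classes = assignments[(x, y)]
--                 if len(classes) > 2:
--                     row += "?"
--                     non_separations += 1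
--                 else:
--                     cls = list(classes.keys())[0]
--                     row += str(cls)
--         summary_text += row + "\n"
--     return non_separations, summary_text
-- ===== SOURCE B (Python) =====
-- def __summarise_class_assignments(assignments, grid_width, grid_height):
--     """Two separate passes: count non-separations sparsely over the dict's items,
--     then build the text with joined comprehensions over the grid."""
--     non_separations = sum(
--         1 for (x, y), classes in assignments.items()
--         if 0 <= x < grid_width and 0 <= y < grid_height and len(classes) > 2)
--
--     def cell(x, y):
--         classes = assignments.get((x, y))
--         if classes is None:
--             return "."
--         if len(classes) > 2:
--             return "?"
--         return str(next(iter(classes)))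
--
--     summary_text = "".join(
--         "".join(cell(x, y) for y in range(grid_height)) + "\n"
--         for x in range(grid_width))
--     return non_separations, summary_text
-- ===== Notes on version B (the rewrite author's own statement) =====
-- stated objective: alternative
-- what changed: A fuses counting and text-building in one dense double loop over every grid cell; B computes non_separations in a separate sparse pass over the dict's items (keeping only in-range keys with more than two classes) and builds the text independently with joined comprehensions. Pre_ excludes inputs where A raises IndexError (an in-range cell mapped to an empty class dict) and association lists with duplicate (x,y) keys, which no Python dict can represent.
import Mathlib
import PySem

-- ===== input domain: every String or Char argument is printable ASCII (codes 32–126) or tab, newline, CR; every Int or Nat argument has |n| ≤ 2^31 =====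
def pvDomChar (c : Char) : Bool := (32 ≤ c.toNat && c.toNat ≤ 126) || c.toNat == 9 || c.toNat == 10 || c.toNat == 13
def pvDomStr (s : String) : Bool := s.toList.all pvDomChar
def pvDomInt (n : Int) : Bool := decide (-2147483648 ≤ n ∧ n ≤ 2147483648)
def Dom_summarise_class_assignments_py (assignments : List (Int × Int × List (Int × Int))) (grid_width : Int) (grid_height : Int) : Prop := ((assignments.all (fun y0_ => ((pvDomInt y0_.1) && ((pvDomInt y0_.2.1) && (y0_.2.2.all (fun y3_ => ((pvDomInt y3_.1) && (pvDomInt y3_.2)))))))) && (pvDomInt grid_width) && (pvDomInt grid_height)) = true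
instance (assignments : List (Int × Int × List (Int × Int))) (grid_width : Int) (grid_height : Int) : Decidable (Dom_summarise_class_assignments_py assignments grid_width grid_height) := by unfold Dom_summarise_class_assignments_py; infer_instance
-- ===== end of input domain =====

-- B splits A's fused double loop into a sparse counting pass over the dict items and a
-- separate text-building pass of joined comprehensions (objective: alternative decomposition).
-- Dict lookup (first match) shared by both ports: `(x, y) in assignments` / `assignments[(x, y)]` / `.get`.
def pvGet (a : List (Int × Int × List (Int × Int))) (x y : Int) : Option (List (Int × Int)) :=
  (a.find? (fun e => e.1 == x && e.2.1 == y)).map (fun e => e.2.2)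

-- len(classes) on the inner dict = number of distinct keys (insertion-order dict semantics).
def pvDLen (classes : List (Int × Int)) : Int :=
  ((PySem.List.dedup (classes.map Prod.fst)).length : Int)

-- ===== PORT A =====
def summarise_class_assignments_py (assignments : List (Int × Int × List (Int × Int))) (grid_width : Int) (grid_height : Int) : Int × String :=
  let st := (PySem.List.pyRange 0 grid_width).foldl (fun (st : String × Int) x =>
      let row := (PySem.List.pyRange 0 grid_height).foldl (fun (rs : String × Int) y =>
          match pvGet assignments x y with
          | none => (rs.1 ++ ".", rs.2)
          | some classes =>
            if 2 < pvDLen classes then (rs.1 ++ "?", rs.2 + 1)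
            else (rs.1 ++ PySem.Int.toStr ((classes.map Prod.fst).headI), rs.2))
        ("", st.2)
      (st.1 ++ row.1 ++ "\n", row.2))
    ("", (0 : Int))
  (st.2, st.1)

-- ===== PORT B =====
def pvCell (assignments : List (Int × Int × List (Int × Int))) (x y : Int) : String :=
  match pvGet assignments x y with
  | none => "."
  | some classes =>
    if 2 < pvDLen classes then "?"
    else PySem.Int.toStr ((classes.map Prod.fst).headI)

def summarise_class_assignments_py_alt (assignments : List (Int × Int × List (Int × Int))) (grid_width : Int) (grid_height : Int) : Int × String :=
  let non_separations : Int :=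
    (assignments.map (fun e =>
      if 0 ≤ e.1 ∧ e.1 < grid_width ∧ 0 ≤ e.2.1 ∧ e.2.1 < grid_height ∧ 2 < pvDLen e.2.2
      then (1 : Int) else 0)).sum
  let summary_text :=
    PySem.Str.join "" ((PySem.List.pyRange 0 grid_width).map (fun x =>
      PySem.Str.join "" ((PySem.List.pyRange 0 grid_height).map (fun y => pvCell assignments x y)) ++ "\n"))
  (non_separations, summary_text)

-- ===== PRECONDITION & SPEC =====
-- Pre_ excludes (a) inputs where Python A raises IndexError (an in-range cell mapped to an
-- EMPTY class dict: `list(classes.keys())[0]` on it), and (b) association lists with duplicate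
-- (x, y) keys, which no Python dict can represent (the dict encoding is ambiguous there).
def Pre_summarise_class_assignments_py (assignments : List (Int × Int × List (Int × Int))) (grid_width : Int) (grid_height : Int) : Prop :=
  (assignments.map (fun e => (e.1, e.2.1))).Nodup ∧
  ∀ e ∈ assignments, e.2.2 = [] →
    ¬(0 ≤ e.1 ∧ e.1 < grid_width ∧ 0 ≤ e.2.1 ∧ e.2.1 < grid_height)
instance (assignments : List (Int × Int × List (Int × Int))) (grid_width : Int) (grid_height : Int) : Decidable (Pre_summarise_class_assignments_py assignments grid_width grid_height) := by unfold Pre_summarise_class_assignments_py; infer_instance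

def pvWitness_summarise_class_assignments_py : (List (Int × Int × List (Int × Int))) × Int × Int :=
  ([(0, 0, [(1, 1)]), (1, 1, [(2, 1), (3, 1), (4, 1)])], 2, 2)

def Spec_summarise_class_assignments_py (assignments : List (Int × Int × List (Int × Int))) (grid_width : Int) (grid_height : Int) (out : Int × String) : Prop := out = summarise_class_assignments_py_alt assignments grid_width grid_height
instance (assignments : List (Int × Int × List (Int × Int))) (grid_width : Int) (grid_height : Int) (out : Int × String) : Decidable (Spec_summarise_class_assignments_py assignments grid_width grid_height out) := by unfold Spec_summarise_class_assignments_py; infer_instance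

-- ===== CLAIM (what is proved, stated in full; the proofs are below) =====
def Claim_equal_summarise_class_assignments_py : Prop := ∀ (assignments : List (Int × Int × List (Int × Int))) (grid_width : Int) (grid_height : Int), Dom_summarise_class_assignments_py assignments grid_width grid_height → Pre_summarise_class_assignments_py assignments grid_width grid_height → Spec_summarise_class_assignments_py assignments grid_width grid_height (summarise_class_assignments_py assignments grid_width grid_height)

-- ===== LEMMAS AND PROOFS =====

-- whether A writes "?" (and counts) at cell (x, y)
def pvQual (a : List (Int × Int × List (Int × Int))) (x y : Int) : Bool :=
  match pvGet a x y with
  | some c => decide (2 < pvDLen c)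
  | none => false

theorem pvJoinEmpty_nil : PySem.Str.join "" ([] : List String) = "" := rfl

theorem pvJoinEmpty_cons (p : String) (ps : List String) :
    PySem.Str.join "" (p :: ps) = p ++ PySem.Str.join "" ps := by
  cases ps with
  | nil => simp [PySem.Str.join, PySem.Chars.join, List.intercalate]
  | cons q qs => simp [PySem.Str.join, PySem.Chars.join, List.intercalate]

theorem pvGet_cons (e : Int × Int × List (Int × Int)) (rest : List (Int × Int × List (Int × Int))) (x y : Int) :
    pvGet (e :: rest) x y = if e.1 = x ∧ e.2.1 = y then some e.2.2 else pvGet rest x y := by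
  simp only [pvGet, List.find?_cons]
  by_cases h : e.1 = x ∧ e.2.1 = y
  · simp [h]
  · have : (e.1 == x && e.2.1 == y) = false := by
      simp only [Bool.and_eq_false_iff, beq_eq_false_iff_ne, ne_eq]; tauto
    simp [this, h]

theorem pvGet_eq_none (rest : List (Int × Int × List (Int × Int))) (x y : Int)
    (h : (x, y) ∉ rest.map (fun e => (e.1, e.2.1))) : pvGet rest x y = none := by
  induction rest with
  | nil => rfl
  | cons e r ih =>
    simp only [List.map_cons, List.mem_cons, not_or] at h
    have hne : (e.1 == x && e.2.1 == y) = false := by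
      simp only [Bool.and_eq_false_iff, beq_eq_false_iff_ne, ne_eq]
      by_contra hc
      push_neg at hc
      exact h.1 (by simp [hc.1, hc.2])
    simp only [pvGet, List.find?_cons, hne]
    exact ih h.2

-- sums over a Nodup list of functions that differ at most at x0
theorem pvSum_update {l : List Int} (hl : l.Nodup) (f g : Int → Int) (x0 : Int)
    (hfg : ∀ z ∈ l, z ≠ x0 → f z = g z) :
    (l.map f).sum = (l.map g).sum + (if x0 ∈ l then f x0 - g x0 else 0) := by
  induction l with
  | nil => simp
  | cons a t ih =>
    simp only [List.nodup_cons] at hl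
    by_cases ha : a = x0
    · subst ha
      have : ∀ z ∈ t, z ≠ a → f z = g z := fun z hz => hfg z (by simp [hz])
      have ht : (t.map f).sum = (t.map g).sum := by
        rw [ih hl.2 this]; simp [hl.1]
      simp [ht]; ring
    · have hfa : f a = g a := hfg a (by simp) ha
      rw [List.map_cons, List.map_cons, List.sum_cons, List.sum_cons, ih hl.2 (fun z hz => hfg z (by simp [hz]))]
      by_cases hx : x0 ∈ t <;> simp [hx, Ne.symm ha, hfa] <;> ring

theorem pvInner (a : List (Int × Int × List (Int × Int))) (x : Int) :
    ∀ (l : List Int) (s : String) (n : Int),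
    l.foldl (fun (rs : String × Int) y =>
        match pvGet a x y with
        | none => (rs.1 ++ ".", rs.2)
        | some classes =>
          if 2 < pvDLen classes then (rs.1 ++ "?", rs.2 + 1)
          else (rs.1 ++ PySem.Int.toStr ((classes.map Prod.fst).headI), rs.2)) (s, n)
      = (s ++ PySem.Str.join "" (l.map (fun y => pvCell a x y)),
         n + (l.map (fun y => if pvQual a x y then (1 : Int) else 0)).sum) := by
  intro l
  induction l with
  | nil => intro s n; simp [pvJoinEmpty_nil]
  | cons y t ih =>
    intro s n
    rw [List.foldl_cons]
    rcases hg : pvGet a x y with _ | c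
    · simp only [hg]
      rw [ih]
      simp [List.map_cons, pvJoinEmpty_cons, pvCell, pvQual, hg, String.append_assoc]
    · simp only [hg]
      by_cases hq : 2 < pvDLen c
      · simp only [if_pos hq]
        rw [ih]
        simp [List.map_cons, pvJoinEmpty_cons, pvCell, pvQual, hg, hq, String.append_assoc]
        ring
      · simp only [if_neg hq]
        rw [ih]
        simp [List.map_cons, pvJoinEmpty_cons, pvCell, pvQual, hg, hq, String.append_assoc]

theorem pvOuter (a : List (Int × Int × List (Int × Int))) (h : Int) :
    ∀ (l : List Int) (s : String) (n : Int),
    l.foldl (fun (st : String × Int) x =>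
      let row := (PySem.List.pyRange 0 h).foldl (fun (rs : String × Int) y =>
          match pvGet a x y with
          | none => (rs.1 ++ ".", rs.2)
          | some classes =>
            if 2 < pvDLen classes then (rs.1 ++ "?", rs.2 + 1)
            else (rs.1 ++ PySem.Int.toStr ((classes.map Prod.fst).headI), rs.2))
        ("", st.2)
      (st.1 ++ row.1 ++ "\n", row.2)) (s, n)
      = (s ++ PySem.Str.join "" (l.map (fun x =>
           PySem.Str.join "" ((PySem.List.pyRange 0 h).map (fun y => pvCell a x y)) ++ "\n")),
         n + (l.map (fun x =>
           ((PySem.List.pyRange 0 h).map (fun y => if pvQual a x y then (1 : Int) else 0)).sum)).sum) := by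
  intro l
  induction l with
  | nil => intro s n; simp [pvJoinEmpty_nil]
  | cons x t ih =>
    intro s n
    rw [List.foldl_cons]
    simp only [pvInner a x (PySem.List.pyRange 0 h)]
    rw [ih]
    simp [List.map_cons, pvJoinEmpty_cons, String.append_assoc]
    ring

theorem pvCount_eq (a : List (Int × Int × List (Int × Int))) (w h : Int)
    (hnd : (a.map (fun e => (e.1, e.2.1))).Nodup) :
    ((PySem.List.pyRange 0 w).map (fun x =>
      ((PySem.List.pyRange 0 h).map (fun y => if pvQual a x y then (1 : Int) else 0)).sum)).sum
    = (a.map (fun e =>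
        if 0 ≤ e.1 ∧ e.1 < w ∧ 0 ≤ e.2.1 ∧ e.2.1 < h ∧ 2 < pvDLen e.2.2
        then (1 : Int) else 0)).sum := by
  induction a with
  | nil => simp [pvQual, pvGet]
  | cons e rest ih =>
    simp only [List.map_cons, List.nodup_cons] at hnd
    have hkey := hnd.1
    have hq : ∀ x y, pvQual (e :: rest) x y
        = if e.1 = x ∧ e.2.1 = y then decide (2 < pvDLen e.2.2) else pvQual rest x y := by
      intro x y
      simp only [pvQual, pvGet_cons]
      split_ifs <;> rfl
    have hq0 : pvQual rest e.1 e.2.1 = false := by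
      simp [pvQual, pvGet_eq_none rest e.1 e.2.1 hkey]
    have hinner_ne : ∀ x, x ≠ e.1 →
        ((PySem.List.pyRange 0 h).map (fun y => if pvQual (e :: rest) x y then (1 : Int) else 0)).sum
        = ((PySem.List.pyRange 0 h).map (fun y => if pvQual rest x y then (1 : Int) else 0)).sum := by
      intro x hx
      congr 1
      apply List.map_congr_left
      intro y _
      rw [hq]
      have : ¬(e.1 = x ∧ e.2.1 = y) := fun hc => hx hc.1.symm
      rw [if_neg this]
    have hinner_eq :
        ((PySem.List.pyRange 0 h).map (fun y => if pvQual (e :: rest) e.1 y then (1 : Int) else 0)).sum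
        = ((PySem.List.pyRange 0 h).map (fun y => if pvQual rest e.1 y then (1 : Int) else 0)).sum
          + (if e.2.1 ∈ PySem.List.pyRange 0 h then (if 2 < pvDLen e.2.2 then (1:Int) else 0) else 0) := by
      rw [pvSum_update (PySem.List.nodup_pyRange_one 0 h)
        (fun y => if pvQual (e :: rest) e.1 y then (1 : Int) else 0)
        (fun y => if pvQual rest e.1 y then (1 : Int) else 0) e.2.1 ?_]
      · have hδ : (if pvQual (e :: rest) e.1 e.2.1 = true then (1:Int) else 0)
            - (if pvQual rest e.1 e.2.1 = true then (1:Int) else 0)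
            = (if 2 < pvDLen e.2.2 then (1:Int) else 0) := by
          have h1 : pvQual (e :: rest) e.1 e.2.1 = decide (2 < pvDLen e.2.2) := by
            rw [hq]; simp
          rw [h1, hq0]
          by_cases hd : 2 < pvDLen e.2.2 <;> simp [hd]
        congr 1
        show (if e.2.1 ∈ PySem.List.pyRange 0 h then
            (if pvQual (e :: rest) e.1 e.2.1 = true then (1:Int) else 0)
            - (if pvQual rest e.1 e.2.1 = true then (1:Int) else 0) else 0) = _
        rw [hδ]
      · intro z _ hz
        show (if pvQual (e :: rest) e.1 z = true then (1:Int) else 0)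
          = (if pvQual rest e.1 z = true then (1:Int) else 0)
        rw [hq]
        have : ¬(e.1 = e.1 ∧ e.2.1 = z) := fun hc => hz hc.2.symm
        rw [if_neg this]
    rw [pvSum_update (PySem.List.nodup_pyRange_one 0 w) _ _ e.1 (fun z _ hz => hinner_ne z hz), ih hnd.2]
    rw [List.map_cons, List.sum_cons, hinner_eq]
    simp only [PySem.List.mem_pyRange_one]
    by_cases hd : 2 < pvDLen e.2.2 <;> split_ifs <;> omega

-- ===== VERDICT (by name: the statement is the Claim_ definition above) =====
theorem summarise_class_assignments_py_spec : Claim_equal_summarise_class_assignments_py := by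
  intro a w h _ hpre
  unfold Spec_summarise_class_assignments_py
  unfold summarise_class_assignments_py summarise_class_assignments_py_alt
  rw [pvOuter a h (PySem.List.pyRange 0 w) "" 0]
  simp only []
  rw [pvCount_eq a w h hpre.1]
  simp
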